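-- pv_equiv track=rewrite | github.com/Constantinepapp/Uni_projects | intro to CS/KinoApi/askisi3.py | findStatistics
-- ===== SOURCE A (Python) =====
-- def findStatistics(lst):
--     counterList = []
--     maxTimes = 0
--     maxNumber = lst[0]
--
--     for number in lst:
--         times = lst.count(number)
--         if times>maxTimes:
--             maxTimes = times
--             maxNumber = number
--         pair = [number,times]
--         if pair not in counterList:
--             counterList.append(pair)
--     return counterList,maxNumber,maxTimes
-- ===== SOURCE B (Python) =====
-- def findStatistics(lst):
--     maxNumber = lst[0]
--     counts = {}
--     for number in lst:
--         counts[number] = counts.get(number, 0) + 1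
--     counterList = []
--     maxTimes = 0
--     for number, times in counts.items():
--         counterList.append([number, times])
--         if times > maxTimes:
--             maxTimes = times
--             maxNumber = number
--     return counterList, maxNumber, maxTimes
-- ===== Notes on version B (the rewrite author's own statement) =====
-- stated objective: faster
-- what changed: Replaces the per-element lst.count rescan and the 'pair not in counterList' membership scan by one counting pass building a frequency dict, then a second pass over the dict's distinct-value items that builds counterList and tracks the strict-greater running max (same first-occurrence order and tie-break).
import Mathlib
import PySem

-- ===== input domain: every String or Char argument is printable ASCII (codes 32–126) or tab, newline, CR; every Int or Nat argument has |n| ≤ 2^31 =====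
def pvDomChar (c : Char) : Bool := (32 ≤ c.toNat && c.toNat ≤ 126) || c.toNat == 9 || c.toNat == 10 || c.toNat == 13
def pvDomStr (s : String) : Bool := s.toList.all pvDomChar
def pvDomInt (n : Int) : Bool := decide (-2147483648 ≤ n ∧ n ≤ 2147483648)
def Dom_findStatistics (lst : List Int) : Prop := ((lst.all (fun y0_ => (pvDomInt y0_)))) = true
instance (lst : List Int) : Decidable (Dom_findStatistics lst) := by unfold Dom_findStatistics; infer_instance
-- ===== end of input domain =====

-- B replaces A's quadratic per-element lst.count rescans and counterList membership scans
-- by one counting pass over a dict plus one pass over its distinct-value items (faster).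


-- ===== PORT A =====
-- loop body of A, step for step: times = lst.count(number); max update; conditional append
def stepA (lst : List Int) (s : List (List Int) × Int × Int) (number : Int) :
    List (List Int) × Int × Int :=
  let times : Int := (PySem.List.count lst number : Int)
  let mT' := if times > s.2.2 then times else s.2.2
  let mN' := if times > s.2.2 then number else s.2.1
  let pair := [number, times]
  let cl' := if pair ∈ s.1 then s.1 else s.1 ++ [pair]
  (cl', mN', mT')

def findStatistics (lst : List Int) : List (List Int) × Int × Int :=
  match PySem.List.pyGet? lst 0 with      -- maxNumber seeded from the first element; none = IndexError, excluded by Pre_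
  | none => ([], 0, 0)
  | some m0 => lst.foldl (stepA lst) ([], m0, 0)

-- ===== PORT B =====
-- loop body of B's second pass: append [number, times], then strict-greater max update
def stepB (s : List (List Int) × Int × Int) (p : Int × Int) :
    List (List Int) × Int × Int :=
  let cl' := s.1 ++ [[p.1, p.2]]
  if p.2 > s.2.2 then (cl', p.1, p.2) else (cl', s.2.1, s.2.2)

def findStatistics_alt (lst : List Int) : List (List Int) × Int × Int :=
  match PySem.List.pyGet? lst 0 with      -- maxNumber seeded from the first element; none = IndexError, excluded by Pre_
  | none => ([], 0, 0)
  | some m0 =>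
    let counts := lst.foldl (fun d n => d.insert n (d.getD n 0 + 1))
      (PySem.Dict.empty : PySem.Dict Int Int)
    counts.items.foldl stepB ([], m0, 0)

-- ===== PRECONDITION & SPEC =====
-- A indexes the first element up front: the empty list raises IndexError, hence is excluded.
def Pre_findStatistics (lst : List Int) : Prop := lst ≠ []
instance (lst : List Int) : Decidable (Pre_findStatistics lst) := by unfold Pre_findStatistics; infer_instance
def pvWitness_findStatistics : List Int := [1, 2, 2]
def Spec_findStatistics (lst : List Int) (out : List (List Int) × Int × Int) : Prop := out = findStatistics_alt lst
instance (lst : List Int) (out : List (List Int) × Int × Int) : Decidable (Spec_findStatistics lst out) := by unfold Spec_findStatistics; infer_instance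

-- ===== CLAIM (what is proved, stated in full; the proofs are below) =====
def Claim_equal_findStatistics : Prop := ∀ (lst : List Int), Dom_findStatistics lst → Pre_findStatistics lst → Spec_findStatistics lst (findStatistics lst)

-- ===== LEMMAS AND PROOFS =====

-- the [value, count] pair A stores for a value, and the running-max step both loops perform
def pairsOf (lst : List Int) (v : Int) : List Int := [v, (PySem.List.count lst v : Int)]
def mstep (lst : List Int) (s : Int × Int) (v : Int) : Int × Int :=
  if (PySem.List.count lst v : Int) > s.2 then (v, (PySem.List.count lst v : Int)) else s

theorem mem_map_pairsOf {lst : List Int} {seen : List Int} {n : Int} :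
    [n, (PySem.List.count lst n : Int)] ∈ seen.map (pairsOf lst) ↔ n ∈ seen := by
  constructor
  · intro h
    rcases List.mem_map.mp h with ⟨v, hv, he⟩
    simp only [pairsOf, List.cons.injEq] at he
    exact he.1 ▸ hv
  · intro h; exact List.mem_map_of_mem h

theorem update_prefix {seen : List Int} (p : List Int) :
    seen <+: PySem.Set.update seen p := by
  induction p generalizing seen with
  | nil => exact List.prefix_refl _
  | cons n p ih =>
    have h1 : PySem.Set.update seen (n :: p) = PySem.Set.update (PySem.Set.add seen n) p := rfl
    have h2 : seen <+: PySem.Set.add seen n := by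
      unfold PySem.Set.add
      split
      · exact List.prefix_refl _
      · exact ⟨[n], rfl⟩
    exact h1 ▸ h2.trans (ih (seen := PySem.Set.add seen n))

theorem lemB (lst : List Int) (D : List Int) : ∀ (cl : List (List Int)) (mN mT : Int),
    (D.map (fun v => (v, (PySem.List.count lst v : Int)))).foldl stepB (cl, mN, mT)
      = (cl ++ D.map (pairsOf lst), D.foldl (mstep lst) (mN, mT)) := by
  induction D with
  | nil => intro cl mN mT; simp
  | cons v D ih =>
    intro cl mN mT
    simp only [List.map_cons, List.foldl_cons, stepB, mstep]
    split
    · rw [ih]; simp [pairsOf]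
    · rw [ih]; simp [pairsOf]

theorem lemA (lst : List Int) (p : List Int) : ∀ (seen : List Int) (mN mT : Int),
    (∀ v ∈ seen, (PySem.List.count lst v : Int) ≤ mT) →
    p.foldl (stepA lst) (seen.map (pairsOf lst), mN, mT)
      = ((PySem.Set.update seen p).map (pairsOf lst),
         ((PySem.Set.update seen p).drop seen.length).foldl (mstep lst) (mN, mT)) := by
  induction p with
  | nil =>
    intro seen mN mT _
    simp [PySem.Set.update]
  | cons n p ih =>
    intro seen mN mT hinv
    have hupd : PySem.Set.update seen (n :: p) = PySem.Set.update (PySem.Set.add seen n) p := rfl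
    by_cases hmem : n ∈ seen
    · have hadd : PySem.Set.add seen n = seen := by
        unfold PySem.Set.add
        simp [PySem.Set.contains, hmem]
      have hle : ¬ ((PySem.List.count lst n : Int) > mT) := not_lt.mpr (hinv n hmem)
      have hbody : stepA lst (seen.map (pairsOf lst), mN, mT) n = (seen.map (pairsOf lst), mN, mT) := by
        simp only [stepA, if_neg hle, if_pos (mem_map_pairsOf.mpr hmem)]
      rw [List.foldl_cons, hbody, ih seen mN mT hinv, hupd, hadd]
    · have hadd : PySem.Set.add seen n = seen ++ [n] := by
        unfold PySem.Set.add
        simp [PySem.Set.contains, hmem]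
      have hnotm : [n, (PySem.List.count lst n : Int)] ∉ seen.map (pairsOf lst) := fun h =>
        hmem (mem_map_pairsOf.mp h)
      have hbody : stepA lst (seen.map (pairsOf lst), mN, mT) n
          = ((seen ++ [n]).map (pairsOf lst),
             (if (PySem.List.count lst n : Int) > mT then n else mN),
             (if (PySem.List.count lst n : Int) > mT then (PySem.List.count lst n : Int) else mT)) := by
        simp only [stepA, List.map_append]
        rw [if_neg hnotm]
        rfl
      have hinv' : ∀ v ∈ seen ++ [n], (PySem.List.count lst v : Int) ≤
          (if (PySem.List.count lst n : Int) > mT then (PySem.List.count lst n : Int) else mT) := by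
        intro v hv
        rcases List.mem_append.mp hv with hv | hv
        · have := hinv v hv
          split <;> omega
        · simp at hv
          subst hv
          split <;> omega
      rw [List.foldl_cons, hbody, ih (seen ++ [n]) _ _ hinv', hupd, hadd]
      -- reconcile the drop/max part
      obtain ⟨t, ht⟩ := update_prefix (seen := seen ++ [n]) p
      rw [← ht]
      have hd1 : ((seen ++ [n]) ++ t).drop (seen ++ [n]).length = t := List.drop_left
      have hd2 : ((seen ++ [n]) ++ t).drop seen.length = n :: t := by
        rw [List.append_assoc, List.drop_left' (by simp)]
        simp
      rw [hd1, hd2, List.foldl_cons]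
      have hm : mstep lst (mN, mT) n
          = ((if (PySem.List.count lst n : Int) > mT then n else mN),
             (if (PySem.List.count lst n : Int) > mT then (PySem.List.count lst n : Int) else mT)) := by
        simp only [mstep]
        split <;> simp
      rw [hm]

theorem pyGet?_head (n : Int) (t : List Int) : PySem.List.pyGet? (n :: t) 0 = some n := by
  simp [PySem.List.pyGet?, PySem.List.pyIdx?]

-- ===== VERDICT (by name: the statement is the Claim_ definition above) =====
theorem findStatistics_spec : Claim_equal_findStatistics := by
  intro lst _ hpre
  unfold Spec_findStatistics
  cases lst with
  | nil => exact absurd rfl hpre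
  | cons n t =>
    simp only [findStatistics, findStatistics_alt, pyGet?_head]
    have hA := lemA (n :: t) (n :: t) [] n 0 (by simp)
    simp only [List.map_nil, List.length_nil, List.drop_zero] at hA
    rw [hA]
    rw [PySem.Dict.foldl_insert_getD_add_one_eq_counter, PySem.Dict.items_counter]
    have hcnt : (PySem.Set.ofList (n :: t)).map (fun k => (k, ((List.count k (n :: t) : Nat) : Int)))
        = (PySem.Set.ofList (n :: t)).map (fun v => (v, (PySem.List.count (n :: t) v : Int))) := by
      simp [PySem.List.count_eq]
    rw [hcnt, lemB (n :: t) (PySem.Set.ofList (n :: t)) [] n 0]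
    rw [PySem.Set.ofList_eq_foldl]
    rfl
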